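-- pv_equiv track=rewrite | github.com/ontivv/UTN-TUPaDProgramacion1 | Unidad 9 trabajos/test.py | palabra_invertida
-- ===== SOURCE A (Python) =====
-- def palabra_invertida(palabra_normal,letra_p,cont,palabra_invert):
--     if cont < 0:
--         palabra_final ="".join(palabra_invert).strip().lower()
--         if palabra_final == palabra_normal.lower():
--             return True
--         else:
--             return False
--     else:
--         palabra_invert.append(letra_p[cont])
--         return palabra_invertida(palabra_normal,letra_p,cont-1,palabra_invert)
-- ===== SOURCE B (Python) =====
-- def palabra_invertida(palabra_normal,letra_p,cont,palabra_invert):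
--     for i in range(cont, -1, -1):
--         palabra_invert.append(letra_p[i])
--     return "".join(palabra_invert).strip().lower() == palabra_normal.lower()
-- ===== Notes on version B (the rewrite author's own statement) =====
-- stated objective: simpler
-- what changed: Replaces the tail recursion (one stack frame per character, hits Python's recursion limit) with a single countdown for-loop appending to the same list, then one join/strip/lower comparison.
import Mathlib
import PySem

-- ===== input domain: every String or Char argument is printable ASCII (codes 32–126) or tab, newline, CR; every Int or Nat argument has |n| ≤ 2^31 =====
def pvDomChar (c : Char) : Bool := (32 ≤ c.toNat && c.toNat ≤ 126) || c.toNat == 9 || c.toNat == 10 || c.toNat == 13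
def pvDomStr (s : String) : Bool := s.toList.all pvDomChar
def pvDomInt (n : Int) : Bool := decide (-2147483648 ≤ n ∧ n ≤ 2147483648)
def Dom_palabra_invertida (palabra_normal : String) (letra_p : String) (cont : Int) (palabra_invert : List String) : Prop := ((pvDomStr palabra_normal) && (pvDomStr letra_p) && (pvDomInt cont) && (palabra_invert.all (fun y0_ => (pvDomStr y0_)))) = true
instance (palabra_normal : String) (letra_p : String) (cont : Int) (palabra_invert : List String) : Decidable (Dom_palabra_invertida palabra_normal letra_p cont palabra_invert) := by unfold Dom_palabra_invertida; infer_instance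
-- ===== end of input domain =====

-- B replaces A's tail recursion by a countdown loop over range(cont,-1,-1) with the same list
-- mutation; return-value equivalence is what is proved (both mutate palabra_invert identically).

-- ===== PORT A =====
def palabra_invertida (palabra_normal : String) (letra_p : String) (cont : Int) (palabra_invert : List String) : Bool :=
  if _h : cont < 0 then
    PySem.Str.lower (PySem.Str.strip (PySem.Str.join "" palabra_invert)) == PySem.Str.lower palabra_normal
  else
    match PySem.Str.pyGet? letra_p cont with
    | none => false  -- IndexError in Python; excluded by Pre_
    | some c => palabra_invertida palabra_normal letra_p (cont - 1) (palabra_invert ++ [String.singleton c])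
termination_by (cont + 1).toNat
decreasing_by omega

-- ===== PORT B =====
def palabra_invertida_alt (palabra_normal : String) (letra_p : String) (cont : Int) (palabra_invert : List String) : Bool :=
  let acc := (PySem.List.pyRange cont (-1) (-1)).foldl
    (fun acc i =>
      match PySem.Str.pyGet? letra_p i with
      | none => acc  -- IndexError in Python; excluded by Pre_
      | some c => acc ++ [String.singleton c]) palabra_invert
  PySem.Str.lower (PySem.Str.strip (PySem.Str.join "" acc)) == PySem.Str.lower palabra_normal

-- ===== PRECONDITION & SPEC =====
-- Pre_ excludes exactly the inputs where letra_p[cont] (and the subsequent indices) would raise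
-- IndexError in both Pythons: 0 ≤ cont together with len(letra_p) ≤ cont.
def Pre_palabra_invertida (palabra_normal : String) (letra_p : String) (cont : Int) (palabra_invert : List String) : Prop :=
  cont < (PySem.Str.len letra_p : Int)
instance (palabra_normal : String) (letra_p : String) (cont : Int) (palabra_invert : List String) : Decidable (Pre_palabra_invertida palabra_normal letra_p cont palabra_invert) := by unfold Pre_palabra_invertida; infer_instance

def pvWitness_palabra_invertida : String × String × Int × List String := ("oso", "oso", 2, [])

def Spec_palabra_invertida (palabra_normal : String) (letra_p : String) (cont : Int) (palabra_invert : List String) (out : Bool) : Prop := out = palabra_invertida_alt palabra_normal letra_p cont palabra_invert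
instance (palabra_normal : String) (letra_p : String) (cont : Int) (palabra_invert : List String) (out : Bool) : Decidable (Spec_palabra_invertida palabra_normal letra_p cont palabra_invert out) := by unfold Spec_palabra_invertida; infer_instance

-- ===== CLAIM (what is proved, stated in full; the proofs are below) =====
def Claim_equal_palabra_invertida : Prop := ∀ (palabra_normal : String) (letra_p : String) (cont : Int) (palabra_invert : List String), Dom_palabra_invertida palabra_normal letra_p cont palabra_invert → Pre_palabra_invertida palabra_normal letra_p cont palabra_invert → Spec_palabra_invertida palabra_normal letra_p cont palabra_invert (palabra_invertida palabra_normal letra_p cont palabra_invert)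

-- ===== LEMMAS AND PROOFS =====

-- One step of B's loop: for 0 ≤ cont, the countdown range peels off `cont` first.
theorem alt_step (palabra_normal letra_p : String) (cont : Int) (palabra_invert : List String)
    (h : ¬ cont < 0) (c : Char) (hget : PySem.Str.pyGet? letra_p cont = some c) :
    palabra_invertida_alt palabra_normal letra_p cont palabra_invert
      = palabra_invertida_alt palabra_normal letra_p (cont - 1) (palabra_invert ++ [String.singleton c]) := by
  unfold palabra_invertida_alt
  have hget' : PySem.List.pyGet? letra_p.toList cont = some c := by simpa using hget
  rw [PySem.List.pyRange_neg_one_cons (by omega : (-1 : Int) < cont)]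
  simp [List.foldl, hget']

theorem alt_base (palabra_normal letra_p : String) (cont : Int) (palabra_invert : List String)
    (h : cont < 0) :
    palabra_invertida_alt palabra_normal letra_p cont palabra_invert
      = (PySem.Str.lower (PySem.Str.strip (PySem.Str.join "" palabra_invert)) == PySem.Str.lower palabra_normal) := by
  unfold palabra_invertida_alt
  rw [PySem.List.pyRange_neg_one_eq_nil (by omega : cont ≤ -1)]
  simp [List.foldl]

theorem main_eq (n : Nat) : ∀ (cont : Int), (cont + 1).toNat ≤ n →
    ∀ (palabra_normal letra_p : String) (palabra_invert : List String),
    cont < (PySem.Str.len letra_p : Int) →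
    palabra_invertida palabra_normal letra_p cont palabra_invert
      = palabra_invertida_alt palabra_normal letra_p cont palabra_invert := by
  induction n with
  | zero =>
    intro cont hn pn lp pi hlt
    have hneg : cont < 0 := by omega
    rw [palabra_invertida, dif_pos hneg, alt_base pn lp cont pi hneg]
  | succ m ih =>
    intro cont hn pn lp pi hlt
    by_cases hneg : cont < 0
    · rw [palabra_invertida, dif_pos hneg, alt_base pn lp cont pi hneg]
    · have h0 : 0 ≤ cont := by omega
      obtain ⟨k, rfl⟩ := Int.eq_ofNat_of_zero_le h0
      have hk : k < lp.toList.length := by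
        have := PySem.Str.len_eq lp
        omega
      have hget : PySem.Str.pyGet? lp (k : Int) = some lp.toList[k] := by
        simp [List.getElem?_eq_getElem hk]
      rw [palabra_invertida, dif_neg hneg, hget]
      rw [alt_step pn lp (k : Int) pi hneg _ hget]
      exact ih ((k : Int) - 1) (by omega) pn lp (pi ++ [String.singleton lp.toList[k]]) (by omega)

-- ===== VERDICT (by name: the statement is the Claim_ definition above) =====
theorem palabra_invertida_spec : Claim_equal_palabra_invertida := by
  intro pn lp cont pi _hdom hpre
  unfold Spec_palabra_invertida
  exact main_eq (cont + 1).toNat cont le_rfl pn lp pi hpre
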